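-- pv_equiv track=rewrite | github.com/wwweiwei/LeetCode | trend_2.py | solution
-- ===== SOURCE A (Python) =====
-- def solution(A):
--     '''
--     list_sum: a list to save sum of neighbouring pairs
--     dict_number: {sum_1: count_1, sum_2: count_2, ...}
--     '''
--     if A is None: ## no element
--         return 0
--     elif len(A) == 1: ## just one element
--         return 1
--
--     ## calculate all the sum of neighbouring pairs
--     list_sum = []
--     last_value = A[-1]
--     for i, value in enumerate(A):
--         list_sum.append(value+last_value)
--         last_value = value
--
--     ## calculate the freqency of each sum
--     dict_number = {}
--     for i, key in enumerate(list_sum):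
--         if key not in dict_number:
--             last = -2
--             count = 0
--             for j, value in enumerate(list_sum):
--                 if i == 0 and j == len(list_sum)-1: ## can not use the last element twice
--                     break
--                 if j - last > 1 and value == key: ## not use the same element
--                     count += 1
--                     last = j
--             dict_number[key] = count ## {key, count}
--
--     ## sort the dictionary(dict_number) by count
--     list_order = sorted(dict_number.items(), key=lambda x:x[1])
--
--     return list_order[0][1]
-- ===== SOURCE B (Python) =====
-- def solution(A):
--     if A is None:
--         return 0
--     n = len(A)
--     if n == 1:
--         return 1
--     # circular neighbour-pair sums: sums[i] = A[i] + A[i-1]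
--     sums = [A[i] + A[i - 1] for i in range(n)]
--     # bucket the indices by sum value in one pass
--     buckets = {}
--     for j, v in enumerate(sums):
--         buckets.setdefault(v, []).append(j)
--     # greedy non-adjacent count per bucket; the bucket of sums[0] may not
--     # use the last position (position n-1 would reuse the last element)
--     best = None
--     for k, idxs in buckets.items():
--         if k == sums[0] and idxs[-1] == n - 1:
--             idxs = idxs[:-1]
--         cnt = 0
--         last = -2
--         for j in idxs:
--             if j - last > 1:
--                 cnt += 1
--                 last = j
--         if best is None or cnt < best:
--             best = cnt
--     return best
-- ===== Notes on version B (the rewrite author's own statement) =====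
-- stated objective: faster
-- what changed: A rescans the whole pair-sum list once per distinct sum and then sorts the counts just to read off the minimum; B buckets the indices by sum value in a single pass over the list, runs the greedy non-adjacent count once per bucket (linear in the bucket), and keeps a running minimum, removing both the quadratic rescan and the sort.
-- outside the precondition, e.g. on solution([]): A raises IndexError, B returns None
import Mathlib
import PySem

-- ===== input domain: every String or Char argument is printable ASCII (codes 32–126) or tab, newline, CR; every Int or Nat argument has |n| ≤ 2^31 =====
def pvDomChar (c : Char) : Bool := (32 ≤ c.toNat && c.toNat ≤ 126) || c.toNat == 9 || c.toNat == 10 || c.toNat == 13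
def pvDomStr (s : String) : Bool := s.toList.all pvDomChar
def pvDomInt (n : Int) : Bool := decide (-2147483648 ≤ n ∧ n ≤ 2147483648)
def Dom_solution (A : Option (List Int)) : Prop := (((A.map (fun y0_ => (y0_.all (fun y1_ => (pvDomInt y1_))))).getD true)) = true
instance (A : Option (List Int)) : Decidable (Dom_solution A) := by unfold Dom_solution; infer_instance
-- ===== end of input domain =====

-- B replaces A's quadratic per-key rescans by one pass that buckets indices by pair-sum,
-- then a linear greedy per bucket and a running minimum instead of a sort (objective: faster).


-- ===== PORT A =====
-- list_sum loop: state (list_sum, last_value)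
def aSumStep : (List Int × Int) → (Int × Int) → (List Int × Int) :=
  fun s iv => (s.1 ++ [iv.2 + s.2], iv.2)

-- inner scan for key k seen first at index i; m = len(list_sum) - 1; Python's `break` is the Bool flag
def aInnerStep (i m k : Int) : (Int × Int × Bool) → (Int × Int) → (Int × Int × Bool) :=
  fun s jv =>
    if s.2.2 then s
    else if i = 0 ∧ jv.1 = m then (s.1, s.2.1, true)
    else if jv.1 - s.1 > 1 ∧ jv.2 = k then (jv.1, s.2.1 + 1, false)
    else s

-- the dict_number loop body
def aDictStep (l : List (Int × Int)) (m : Int) :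
    PySem.Dict Int Int → (Int × Int) → PySem.Dict Int Int :=
  fun d ik =>
    if d.contains ik.2 then d
    else d.insert ik.2 ((l.foldl (aInnerStep ik.1 m ik.2) (-2, 0, false)).2.1)

def solution (A : Option (List Int)) : Int :=
  match A with
  | none => 0
  | some a =>
    if a.length = 1 then 1
    else
      let lastv0 : Int := PySem.List.pyGetD a (-1) 0
      let listSum := ((PySem.List.enumerate a 0).foldl aSumStep ([], lastv0)).1
      let dictNumber := (PySem.List.enumerate listSum 0).foldl
        (aDictStep (PySem.List.enumerate listSum 0) (PySem.List.len listSum - 1))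
        PySem.Dict.empty
      let listOrder := PySem.List.sorted dictNumber.items (fun x => x.2) false
      (PySem.List.pyGetD listOrder 0 (0, 0)).2

-- ===== PORT B =====
-- greedy non-adjacent pick over an index list: state (last, cnt)
def bGreedyStep : (Int × Int) → Int → (Int × Int) :=
  fun s j => if j - s.1 > 1 then (j, s.2 + 1) else s

-- buckets.setdefault(v, []).append(j)
def bBucketStep : PySem.Dict Int (List Int) → (Int × Int) → PySem.Dict Int (List Int) :=
  fun d jv => d.modify jv.2 [] (· ++ [jv.1])

-- one bucket: drop the last position for the bucket of sums[0] if it is n-1, greedy, keep the minimum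
def bBestStep (s0 nm1 : Int) : Option Int → (Int × List Int) → Option Int :=
  fun best ki =>
    let idxs := if ki.1 = s0 ∧ PySem.List.pyGetD ki.2 (-1) 0 = nm1
                then PySem.List.slice ki.2 none (some (-1)) else ki.2
    let r := idxs.foldl bGreedyStep (-2, 0)
    match best with
    | none => some r.2
    | some bv => if r.2 < bv then some r.2 else some bv

def solution_alt (A : Option (List Int)) : Int :=
  match A with
  | none => 0
  | some a =>
    let n := a.length
    if n = 1 then 1
    else
      let sums := (PySem.List.pyRange 0 (PySem.List.len a) 1).map
        (fun i => PySem.List.pyGetD a i 0 + PySem.List.pyGetD a (i - 1) 0)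
      let buckets := (PySem.List.enumerate sums 0).foldl bBucketStep PySem.Dict.empty
      let best := buckets.items.foldl
        (bBestStep (PySem.List.pyGetD sums 0 0) ((n : Int) - 1)) none
      best.getD 0

-- ===== PRECONDITION & SPEC =====
-- Pre_ excludes only the empty list, on which Python A raises IndexError reading the last element.
def Pre_solution (A : Option (List Int)) : Prop := A ≠ some []
instance (A : Option (List Int)) : Decidable (Pre_solution A) := by unfold Pre_solution; infer_instance

def pvWitness_solution : Option (List Int) := some [1, 2, 1, 2]

def Spec_solution (A : Option (List Int)) (out : Int) : Prop := out = solution_alt A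
instance (A : Option (List Int)) (out : Int) : Decidable (Spec_solution A out) := by
  unfold Spec_solution; infer_instance

-- ===== CLAIM (what is proved, stated in full; the proofs are below) =====
def Claim_equal_solution : Prop :=
  ∀ (A : Option (List Int)), Dom_solution A → Pre_solution A → Spec_solution A (solution A)

-- ===== LEMMAS AND PROOFS =====

def pvSums (a : List Int) : List Int :=
  (a.zip (PySem.List.pyGetD a (-1) 0 :: a)).map (fun p => p.1 + p.2)

theorem pvSums_length (a : List Int) : (pvSums a).length = a.length := by
  simp [pvSums]


theorem aSum_eq (a : List Int) : ∀ (s : Int) (acc : List Int) (l : Int),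
    ((PySem.List.enumerate a s).foldl aSumStep (acc, l)).1
      = acc ++ (a.zip (l :: a)).map (fun p => p.1 + p.2) := by
  induction a with
  | nil => intro s acc l; simp [PySem.List.enumerate_nil]
  | cons x t ih =>
    intro s acc l
    rw [PySem.List.enumerate_cons]
    simp only [List.foldl_cons, aSumStep, List.zip_cons_cons, List.map_cons]
    rw [ih]
    simp

theorem minfold_some (g : Int → Int) (l : List Int) : ∀ x : Int,
    l.foldl (fun best k => match best with
      | none => some (g k)
      | some bv => if g k < bv then some (g k) else some bv) (some x)
      = some ((l.map g).foldl min x) := by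
  induction l with
  | nil => intro x; rfl
  | cons v t ih =>
    intro x
    simp only [List.foldl_cons, List.map_cons]
    have : (if g v < x then some (g v) else some x) = some (min x (g v)) := by
      rcases lt_or_ge (g v) x with h | h
      · simp [h, le_of_lt h]
      · have h' : ¬ g v < x := not_lt.mpr h
        simp [h', h]
    rw [this, ih]

theorem bSums_eq (a : List Int) :
    (PySem.List.pyRange 0 (PySem.List.len a) 1).map
        (fun i => PySem.List.pyGetD a i 0 + PySem.List.pyGetD a (i - 1) 0)
      = pvSums a := by
  have hr : PySem.List.pyRange 0 (PySem.List.len a) 1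
      = (List.range a.length).map (fun k => Int.ofNat k) := by
    rw [PySem.List.len_eq, PySem.List.pyRange_one]
    have : ((a.length : Int) - 0).toNat = a.length := by omega
    rw [this]
    apply List.map_congr_left
    intro k _
    simp
  rw [hr, List.map_map]
  apply List.ext_getElem
  · simp [pvSums_length]
  · intro i h1 h2
    have hi : i < a.length := by simpa using h1
    simp only [pvSums, List.getElem_map, List.getElem_zip, List.getElem_range,
      Function.comp_apply]
    have hL : PySem.List.pyGetD a (Int.ofNat i) 0 = a[i] := by
      rw [show Int.ofNat i = ((i:Nat) : Int) from rfl, PySem.List.pyGetD_natCast]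
      exact List.getD_eq_getElem a 0 hi
    rw [hL]
    congr 1
    rcases Nat.eq_zero_or_pos i with h0 | h0
    · subst h0
      simp
    · have : Int.ofNat i - 1 = ((i - 1 : Nat) : Int) := by
        simp; omega
      rw [this, PySem.List.pyGetD_natCast]
      rcases i with _ | j
      · omega
      · simp only [List.getElem_cons_succ, Nat.add_sub_cancel]
        exact List.getD_eq_getElem a 0 (by omega)


def gstep (k : Int) : (Int × Int) → (Int × Int) → (Int × Int) :=
  fun s jv => if jv.1 - s.1 > 1 ∧ jv.2 = k then (jv.1, s.2 + 1) else s

def gcnt (k : Int) (l : List (Int × Int)) : Int := (l.foldl (gstep k) (-2, 0)).2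

def wval (L : List Int) (k : Int) : Int :=
  if k = L.getD 0 0 then gcnt k (PySem.List.enumerate L.dropLast 0)
  else gcnt k (PySem.List.enumerate L 0)

theorem flag_no_break (i m k : Int) (l : List (Int × Int))
    (h : ∀ jv ∈ l, ¬ (i = 0 ∧ jv.1 = m)) : ∀ x y : Int,
    l.foldl (aInnerStep i m k) (x, y, false)
      = ((l.foldl (gstep k) (x, y)).1, (l.foldl (gstep k) (x, y)).2, false) := by
  induction l with
  | nil => intro x y; rfl
  | cons jv t ih =>
    intro x y
    have hjv := h jv (List.mem_cons_self)
    have ht : ∀ p ∈ t, ¬ (i = 0 ∧ p.1 = m) := fun p hp => h p (List.mem_cons_of_mem _ hp)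
    simp only [List.foldl_cons, aInnerStep, gstep]
    rw [if_neg (by simp), if_neg hjv]
    by_cases hc : jv.1 - x > 1 ∧ jv.2 = k
    · rw [if_pos hc, if_pos hc]
      exact ih ht jv.1 (y + 1)
    · rw [if_neg hc, if_neg hc]
      exact ih ht x y

theorem aInner_eq (L : List Int) (hL : L ≠ []) (i k : Int) :
    ((PySem.List.enumerate L 0).foldl
        (aInnerStep i (PySem.List.len L - 1) k) (-2, 0, false)).2.1
      = if i = 0 then gcnt k (PySem.List.enumerate L.dropLast 0)
        else gcnt k (PySem.List.enumerate L 0) := by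
  by_cases hi : i = 0
  · rw [if_pos hi]
    subst hi
    -- split the enumerate at the last element
    have hsplit : L = L.dropLast ++ [L.getLast hL] := (List.dropLast_append_getLast hL).symm
    have henum : PySem.List.enumerate L 0
        = PySem.List.enumerate L.dropLast 0
          ++ [((L.dropLast.length : Int), L.getLast hL)] := by
      conv_lhs => rw [hsplit]
      rw [PySem.List.enumerate_append]
      simp [PySem.List.enumerate_cons]
    rw [henum, List.foldl_append]
    have hnb : ∀ jv ∈ PySem.List.enumerate L.dropLast 0,
        ¬ ((0 : Int) = 0 ∧ jv.1 = PySem.List.len L - 1) := by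
      intro jv hjv
      rcases (PySem.List.mem_enumerate_iff _ _ _).mp hjv with ⟨j, hj, rfl⟩
      rintro ⟨-, habs⟩
      rw [PySem.List.len_eq] at habs
      have hL1 : 0 < L.length := List.length_pos_iff.mpr hL
      have hjlt : j < L.dropLast.length := hj
      rw [List.length_dropLast] at hjlt
      omega
    rw [flag_no_break _ _ _ _ hnb]
    simp only [List.foldl_cons, List.foldl_nil, aInnerStep]
    rw [if_neg (by simp)]
    have hfire : True ∧ (L.dropLast.length : Int) = PySem.List.len L - 1 := by
      refine ⟨trivial, ?_⟩
      rw [PySem.List.len_eq, List.length_dropLast]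
      have : 0 < L.length := List.length_pos_iff.mpr hL
      omega
    rw [if_pos hfire]
    rfl
  · rw [if_neg hi]
    have hnb : ∀ jv ∈ PySem.List.enumerate L 0,
        ¬ (i = 0 ∧ jv.1 = PySem.List.len L - 1) := by
      rintro jv _ ⟨h0, -⟩; exact hi h0
    rw [flag_no_break _ _ _ _ hnb]
    rfl


theorem aDict_items (L : List Int) (hL : L ≠ []) : ∀ m, m ≤ L.length →
    ((PySem.List.enumerate (L.take m) 0).foldl
        (aDictStep (PySem.List.enumerate L 0) (PySem.List.len L - 1))
        PySem.Dict.empty).items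
      = (PySem.Set.ofList (L.take m)).map (fun k => (k, wval L k)) := by
  intro m
  induction m with
  | zero => intro _; rfl
  | succ m ih =>
    intro hm1
    have hm : m < L.length := by omega
    have htake : L.take (m + 1) = L.take m ++ [L[m]] := by
      rw [List.take_add_one, List.getElem?_eq_getElem hm]
      rfl
    have hlentake : (L.take m).length = m := by
      rw [List.length_take]; omega
    rw [htake, PySem.List.enumerate_append, List.foldl_append]
    set d := (PySem.List.enumerate (L.take m) 0).foldl
        (aDictStep (PySem.List.enumerate L 0) (PySem.List.len L - 1))
        PySem.Dict.empty with hd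
    have hitems := ih (by omega)
    have hkeys : d.keys = PySem.Set.ofList (L.take m) := by
      show d.items.map (·.1) = _
      rw [hitems, List.map_map]
      simp [Function.comp_def]
    rw [PySem.List.enumerate_cons, PySem.List.enumerate_nil]
    simp only [List.foldl_cons, List.foldl_nil, hlentake]
    by_cases hmem : L[m] ∈ L.take m
    · have hcont : d.contains L[m] = true := by
        rw [PySem.Dict.contains_iff_mem_keys, hkeys]
        exact (PySem.Set.mem_ofList _ _).mpr hmem
      rw [aDictStep, if_pos hcont, hitems,
        PySem.Set.ofList_append_singleton, PySem.Set.add_of_mem ((PySem.Set.mem_ofList _ _).mpr hmem)]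
    · have hcont : d.contains L[m] = false := by
        rw [Bool.eq_false_iff]
        intro habs
        rw [PySem.Dict.contains_iff_mem_keys, hkeys, PySem.Set.mem_ofList] at habs
        exact hmem habs
      rw [aDictStep]
      simp only [hcont, Bool.false_eq_true, if_false]
      rw [PySem.Dict.items_insert_of_not_contains _ _ hcont, hitems]
      rw [PySem.Set.ofList_append_singleton,
        PySem.Set.add_of_not_mem (fun habs => hmem ((PySem.Set.mem_ofList _ _).mp habs)),
        List.map_append, List.map_cons, List.map_nil]
      congr 2
      -- the stored value is wval L L[m]
      rw [aInner_eq L hL]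
      rcases Nat.eq_zero_or_pos m with h0 | h0
      · subst h0
        rw [if_pos (by norm_num), wval,
          if_pos (List.getD_eq_getElem L 0 (by omega)).symm]
      · have hi0 : ¬ ((0 : Int) + (m : Int) = 0) := by omega
        rw [if_neg hi0, wval, if_neg]
        intro habs
        have h0mem : L.getD 0 0 ∈ L.take m := by
          rw [List.getD_eq_getElem L 0 (by omega)]
          have : (L.take m)[0]'(by omega) = L[0] := List.getElem_take
          rw [← this]
          exact List.getElem_mem _
        rw [← habs] at h0mem
        exact hmem h0mem



def idxsOf (L : List Int) (k : Int) : List Int :=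
  ((PySem.List.enumerate L 0).filter (fun jv => jv.2 == k)).map (·.1)

theorem bBuckets_getD (L : List Int) (k : Int) :
    ((PySem.List.enumerate L 0).foldl bBucketStep PySem.Dict.empty).getD k [] = idxsOf L k := by
  have hswap : (PySem.List.enumerate L 0).foldl bBucketStep PySem.Dict.empty
      = ((PySem.List.enumerate L 0).map Prod.swap).foldl
          (fun d (p : Int × Int) => d.modify p.1 [] (· ++ [p.2])) PySem.Dict.empty := by
    rw [List.foldl_map]
    rfl
  rw [hswap, PySem.Dict.getD_foldl_modify_append]
  rw [PySem.Dict.getD_empty, List.filter_map]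
  rw [List.map_map, idxsOf]
  have hf : ((fun (p : Int × Int) => p.1 == k) ∘ Prod.swap) = (fun (jv : Int × Int) => jv.2 == k) := by
    funext p; rfl
  have hm : ((fun (x : Int × Int) => x.2) ∘ Prod.swap) = (fun (x : Int × Int) => x.1) := by
    funext p; rfl
  rw [hf, hm, List.nil_append]
theorem bBuckets_keys (L : List Int) :
    ((PySem.List.enumerate L 0).foldl bBucketStep PySem.Dict.empty).keys
      = PySem.Set.ofList L := by
  have : (PySem.List.enumerate L 0).foldl bBucketStep PySem.Dict.empty
      = (PySem.List.enumerate L 0).foldl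
          (fun d jv => d.modify ((fun (p : Int × Int) => p.2) jv) []
            ((fun (d : PySem.Dict Int (List Int)) (jv : Int × Int) => (· ++ [jv.1])) d jv))
          PySem.Dict.empty := rfl
  rw [this, PySem.Dict.keys_foldl_modify_key]
  rw [PySem.List.map_snd_enumerate]
  rw [show (PySem.Dict.empty : PySem.Dict Int (List Int)).keys = [] from rfl]
  exact PySem.Set.update_nil_left L

theorem gcnt_eq_idx_fold (L : List Int) (k : Int) :
    gcnt k (PySem.List.enumerate L 0) = ((idxsOf L k).foldl bGreedyStep (-2, 0)).2 := by
  rw [idxsOf, List.foldl_map, gcnt]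
  have h1 : (PySem.List.enumerate L 0).foldl (gstep k) (-2, 0)
      = (PySem.List.enumerate L 0).foldl
          (fun s (jv : Int × Int) => if jv.2 = k then bGreedyStep s jv.1 else s) (-2, 0) := by
    apply PySem.List.foldl_congr_mem
    intro s jv _
    by_cases h : jv.2 = k
    · simp [gstep, bGreedyStep, h]
    · simp [gstep, h]
  rw [h1, PySem.List.foldl_ite_eq_foldl_filter]
  have : (fun (x : Int × Int) => decide (x.2 = k)) = (fun (jv : Int × Int) => jv.2 == k) := by
    funext x
    rfl
  rw [this]

theorem enum_split (L : List Int) (hL : L ≠ []) :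
    PySem.List.enumerate L 0
      = PySem.List.enumerate L.dropLast 0
        ++ [((L.dropLast.length : Int), L.getLast hL)] := by
  conv_lhs => rw [(List.dropLast_append_getLast hL).symm]
  rw [PySem.List.enumerate_append]
  simp [PySem.List.enumerate_cons]

theorem idxs_bound (M : List Int) (k : Int) :
    ∀ j ∈ idxsOf M k, 0 ≤ j ∧ j < (M.length : Int) := by
  intro j hj
  rw [idxsOf] at hj
  rcases List.mem_map.mp hj with ⟨p, hp, rfl⟩
  have hpe := (List.mem_filter.mp hp).1
  rcases (PySem.List.mem_enumerate_iff _ _ _).mp hpe with ⟨q, hq, rfl⟩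
  simp
  omega

theorem idxs_ne_nil (M : List Int) (k : Int) (hk : k ∈ M) : idxsOf M k ≠ [] := by
  rcases List.getElem_of_mem hk with ⟨j, hj, rfl⟩
  have hpe : ((0 : Int) + (j : Int), M[j]) ∈ PySem.List.enumerate M 0 :=
    (PySem.List.mem_enumerate_iff _ _ _).mpr ⟨j, hj, rfl⟩
  have : ((0 : Int) + (j : Int)) ∈ idxsOf M M[j] := by
    rw [idxsOf]
    exact List.mem_map.mpr ⟨_, List.mem_filter.mpr ⟨hpe, by simp⟩, rfl⟩
  exact List.ne_nil_of_mem this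

theorem idxs_split (L : List Int) (hL : L ≠ []) (k : Int) :
    idxsOf L k = idxsOf L.dropLast k
      ++ (if L.getLast hL = k then [((L.dropLast.length : Int))] else []) := by
  rw [idxsOf, enum_split L hL, List.filter_append, List.map_append, ← idxsOf]
  congr 1
  by_cases h : L.getLast hL = k
  · simp [h]
  · simp [h]

theorem bBucket_val (L : List Int) (hL2 : 2 ≤ L.length) (k : Int) (hk : k ∈ L) :
    (((if k = L.getD 0 0 ∧ PySem.List.pyGetD (idxsOf L k) (-1) 0 = (L.length : Int) - 1
        then PySem.List.slice (idxsOf L k) none (some (-1)) else idxsOf L k).foldl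
          bGreedyStep (-2, 0)).2) = wval L k := by
  have hL : L ≠ [] := by intro h; subst h; simp at hL2
  have hdl : L.dropLast.length = L.length - 1 := List.length_dropLast
  by_cases hk0 : k = L.getD 0 0
  · by_cases hlast : L.getLast hL = k
    · -- bucket ends with n-1; B drops it, wval scans dropLast
      have hsp : idxsOf L k = idxsOf L.dropLast k ++ [((L.dropLast.length : Int))] := by
        rw [idxs_split L hL k, if_pos hlast]
      have hcond : k = L.getD 0 0 ∧
          PySem.List.pyGetD (idxsOf L k) (-1) 0 = (L.length : Int) - 1 := by
        refine ⟨hk0, ?_⟩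
        rw [hsp, PySem.List.pyGetD_neg_one_append_singleton]
        omega
      rw [if_pos hcond, hsp, PySem.List.slice_to_neg_one, List.dropLast_concat]
      rw [wval, if_pos hk0, gcnt_eq_idx_fold]
    · -- the last position is not in the bucket
      have hsp : idxsOf L k = idxsOf L.dropLast k := by
        rw [idxs_split L hL k, if_neg hlast, List.append_nil]
      have hne : idxsOf L.dropLast k ≠ [] := by
        apply idxs_ne_nil
        have hmem0 : L.getD 0 0 ∈ L.dropLast := by
          rw [List.getD_eq_getElem L 0 (by omega),
            ← List.getElem_dropLast (xs := L) (i := 0) (by omega)]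
          exact List.getElem_mem _
        rw [hk0]
        exact hmem0
      have hcond : ¬ (k = L.getD 0 0 ∧
          PySem.List.pyGetD (idxsOf L k) (-1) 0 = (L.length : Int) - 1) := by
        rintro ⟨-, habs⟩
        rw [hsp, PySem.List.pyGetD_neg_one _ _ hne] at habs
        have hmem := List.getLast_mem hne
        have := idxs_bound L.dropLast k _ hmem
        omega
      rw [if_neg hcond, hsp, wval, if_pos hk0, gcnt_eq_idx_fold]
  · have hcond : ¬ (k = L.getD 0 0 ∧
        PySem.List.pyGetD (idxsOf L k) (-1) 0 = (L.length : Int) - 1) := by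
      rintro ⟨habs, -⟩; exact hk0 habs
    rw [if_neg hcond, wval, if_neg hk0, gcnt_eq_idx_fold]


theorem final_eq (L : List Int) (hL2 : 2 ≤ L.length) :
    (PySem.List.pyGetD (PySem.List.sorted
        (((PySem.List.enumerate L 0).foldl
            (aDictStep (PySem.List.enumerate L 0) (PySem.List.len L - 1))
            PySem.Dict.empty).items)
        (fun x => x.2) false) 0 ((0 : Int), (0 : Int))).2
      = ((((PySem.List.enumerate L 0).foldl bBucketStep PySem.Dict.empty).items.foldl
          (bBestStep (PySem.List.pyGetD L 0 0) ((L.length : Int) - 1)) none)).getD 0 := by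
  have hL : L ≠ [] := by intro h; subst h; simp at hL2
  have hitems := aDict_items L hL L.length le_rfl
  rw [List.take_length] at hitems
  have hbk : ((PySem.List.enumerate L 0).foldl bBucketStep PySem.Dict.empty).keys
      = PySem.Set.ofList L := bBuckets_keys L
  have hbitems : ((PySem.List.enumerate L 0).foldl bBucketStep PySem.Dict.empty).items
      = (PySem.Set.ofList L).map (fun k => (k, idxsOf L k)) := by
    rw [PySem.Dict.items_eq_map_keys _ (by rw [hbk]; exact PySem.Set.nodup_ofList L) [], hbk]
    apply List.map_congr_left
    intro k _
    rw [bBuckets_getD]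
  have hKne : PySem.Set.ofList L ≠ [] := by
    rcases List.exists_cons_of_ne_nil hL with ⟨x, xs, hx⟩
    apply List.ne_nil_of_mem (a := x)
    rw [PySem.Set.mem_ofList, hx]
    exact List.mem_cons_self
  rcases List.exists_cons_of_ne_nil hKne with ⟨k0, rest, hKc⟩
  -- B side computes some (min of the wvals)
  have hfoldB : ((PySem.List.enumerate L 0).foldl bBucketStep PySem.Dict.empty).items.foldl
        (bBestStep (PySem.List.pyGetD L 0 0) ((L.length : Int) - 1)) none
      = some ((rest.map (wval L)).foldl min (wval L k0)) := by
    rw [hbitems, List.foldl_map]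
    have hcong : (PySem.Set.ofList L).foldl
          (fun best k => bBestStep (PySem.List.pyGetD L 0 0) ((L.length : Int) - 1)
            best (k, idxsOf L k)) none
        = (PySem.Set.ofList L).foldl
            (fun best k => match best with
              | none => some (wval L k)
              | some bv => if wval L k < bv then some (wval L k) else some bv) none := by
      apply PySem.List.foldl_congr_mem
      intro acc k hkK
      have hkL : k ∈ L := (PySem.Set.mem_ofList _ _).mp hkK
      have hw := bBucket_val L hL2 k hkL
      simp only [bBestStep, PySem.List.pyGetD_zero]
      rw [hw]
    rw [hcong, hKc, List.foldl_cons]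
    rw [show ((match (none : Option Int) with
      | none => some (wval L k0)
      | some bv => if wval L k0 < bv then some (wval L k0) else some bv)) = some (wval L k0) from rfl]
    rw [minfold_some]
  rw [hfoldB, hitems]
  -- A side: head of the sort is the minimum
  have hsortne : PySem.List.sorted ((PySem.Set.ofList L).map (fun k => (k, wval L k)))
      (fun x => x.2) false ≠ [] := by
    intro habs
    have := PySem.List.length_sorted ((PySem.Set.ofList L).map (fun k => (k, wval L k)))
      (fun x => x.2) false
    rw [habs] at this
    simp [hKc] at this
  rcases List.exists_cons_of_ne_nil hsortne with ⟨m, t, hsort⟩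
  rw [hsort, PySem.List.pyGetD_zero_cons, Option.getD_some]
  have hm_mem : m ∈ (PySem.Set.ofList L).map (fun k => (k, wval L k)) := by
    rw [← PySem.List.mem_sorted _ (fun x : Int × Int => x.2) false, hsort]
    exact List.mem_cons_self
  have hm_le := PySem.List.key_head_sorted_le _ (fun x : Int × Int => x.2) hsort
  set v := (rest.map (wval L)).foldl min (wval L k0) with hv
  have hminq : PySem.List.min? ((PySem.Set.ofList L).map (wval L)) (fun y => y) = some v := by
    rw [hKc, List.map_cons, PySem.List.min?_id_cons]
  have hv_mem := PySem.List.min?_mem hminq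
  have hv_min := PySem.List.min?_isMin hminq
  rcases List.mem_map.mp hm_mem with ⟨km, hkm, hmeq⟩
  rcases List.mem_map.mp hv_mem with ⟨kv, hkv, hveq⟩
  have h1 : v ≤ m.2 := by
    rw [← hmeq]
    exact hv_min _ (List.mem_map.mpr ⟨km, hkm, rfl⟩)
  have h2 : m.2 ≤ v := by
    rw [← hveq]
    exact hm_le _ (List.mem_map.mpr ⟨kv, hkv, rfl⟩)
  omega

theorem main_some (a : List Int) (ha : a ≠ []) (hlen : ¬ a.length = 1) :
    solution (some a) = solution_alt (some a) := by
  have hlen2 : 2 ≤ a.length := by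
    have := List.length_pos_iff.mpr ha
    omega
  have hLlen : (pvSums a).length = a.length := pvSums_length a
  have hsumA : ((PySem.List.enumerate a 0).foldl aSumStep
      ([], PySem.List.pyGetD a (-1) 0)).1 = pvSums a := by
    rw [aSum_eq, List.nil_append]
    rfl
  simp only [solution, solution_alt]
  rw [if_neg hlen, if_neg hlen, hsumA, bSums_eq a, ← hLlen]
  exact final_eq (pvSums a) (by omega)

-- ===== VERDICT (by name: the statement is the Claim_ definition above) =====
theorem solution_spec : Claim_equal_solution := by
  intro A _ hpre
  unfold Spec_solution
  match A with
  | none => rfl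
  | some a =>
    have ha : a ≠ [] := by intro h; exact hpre (by simp [h])
    by_cases hlen : a.length = 1
    · simp [solution, solution_alt, hlen]
    · exact main_some a ha hlen
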